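-- pv_equiv track=rewrite | github.com/drizztSun/common_project | PythonLeetcode/leetcodeM/1124_LongestWell-PerformingInterval.py | longestWPI
-- ===== SOURCE A (Python) =====
-- def longestWPI(hours: list) -> int:
--
--     pos, s = {}, 0
--     ans = 0
--
--     for i in range(len(hours)):
--
--         s += 1 if hours[i] > 8 else -1
--
--         if s > 0:
--             ans = i + 1
--             continue
--
--         if s not in pos:
--             pos[s] = i
--
--         if (s - 1) in pos:
--             ans = max(ans, i - pos[s-1])
--
--     return ans
-- ===== SOURCE B (Python) =====
-- def longestWPI(hours: list) -> int:
--     # Simpler brute force: precompute prefix sums of +/-1 scores, then take the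
--     # longest interval (a, b] whose score sum is positive.
--     pre = [0]
--     for h in hours:
--         pre.append(pre[-1] + (1 if h > 8 else -1))
--     n = len(hours)
--     ans = 0
--     for b in range(1, n + 1):
--         for a in range(b):
--             if pre[a] < pre[b]:
--                 ans = max(ans, b - a)
--     return ans
-- ===== Notes on version B (the rewrite author's own statement) =====
-- stated objective: simpler
-- what changed: Replaces A's one-pass loop with a running sum and a first-occurrence hashmap by a plain brute force: build the +/-1 prefix-sum array once, then scan all interval endpoint pairs and keep the longest one with a positive sum.
import Mathlib
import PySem

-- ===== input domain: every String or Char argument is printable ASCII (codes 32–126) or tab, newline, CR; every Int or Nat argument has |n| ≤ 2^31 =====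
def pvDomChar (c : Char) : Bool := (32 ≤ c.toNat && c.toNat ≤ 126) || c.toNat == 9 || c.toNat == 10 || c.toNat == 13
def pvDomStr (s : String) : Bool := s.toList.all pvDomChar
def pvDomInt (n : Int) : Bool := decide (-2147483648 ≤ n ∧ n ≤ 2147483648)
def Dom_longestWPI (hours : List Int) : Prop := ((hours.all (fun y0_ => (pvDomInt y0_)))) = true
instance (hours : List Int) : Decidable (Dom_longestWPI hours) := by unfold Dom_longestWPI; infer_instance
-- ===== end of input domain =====

-- B replaces A's one-pass running-sum + first-occurrence-hashmap scan by a plain brute force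
-- over the prefix-sum array (simpler, not faster).

-- ===== PORT A =====
-- loop body of A's 'for i in range(len(hours))' (state: (pos, s, ans))
def stepA (hours : List Int) (st : PySem.Dict Int Int × Int × Int) (i : Int) :
    PySem.Dict Int Int × Int × Int :=
  let pos := st.1
  let s := st.2.1 + (if PySem.List.pyGetD hours i 0 > 8 then 1 else -1)
  if s > 0 then (pos, s, i + 1)
  else
    let pos := if pos.contains s then pos else pos.insert s i
    let ans := if pos.contains (s - 1) then max st.2.2 (i - pos.getD (s - 1) 0) else st.2.2
    (pos, s, ans)

def longestWPI (hours : List Int) : Int :=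
  ((PySem.List.pyRange 0 (hours.length : Int) 1).foldl (stepA hours)
    (PySem.Dict.empty, 0, 0)).2.2

-- ===== PORT B =====
-- 'pre = [0]; for h in hours: pre.append(pre[-1] + (1 if h > 8 else -1))' (carries pre[-1])
def buildPre (c : Int) : List Int → List Int
  | [] => [c]
  | h :: t => c :: buildPre (c + (if h > 8 then 1 else -1)) t

def longestWPI_alt (hours : List Int) : Int :=
  let pre := buildPre 0 hours
  let n : Int := hours.length
  (PySem.List.pyRange 1 (n + 1) 1).foldl (fun ans b =>
    (PySem.List.pyRange 0 b 1).foldl (fun ans a =>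
      if PySem.List.pyGetD pre a 0 < PySem.List.pyGetD pre b 0 then max ans (b - a) else ans)
      ans) 0

-- ===== PRECONDITION & SPEC =====
def Spec_longestWPI (hours : List Int) (out : Int) : Prop := out = longestWPI_alt hours
instance (hours : List Int) (out : Int) : Decidable (Spec_longestWPI hours out) := by unfold Spec_longestWPI; infer_instance

-- ===== CLAIM (what is proved, stated in full; the proofs are below) =====
def Claim_equal_longestWPI : Prop := ∀ (hours : List Int), Dom_longestWPI hours → Spec_longestWPI hours (longestWPI hours)

-- ===== LEMMAS AND PROOFS =====

def stepv (h : Int) : Int := if h > 8 then 1 else -1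
def pref (hours : List Int) (k : Nat) : Int := ((hours.take k).map stepv).sum

theorem pref_succ_lt (hours : List Int) (k : Nat) (hk : k < hours.length) :
    pref hours (k + 1) = pref hours k + stepv (hours.getD k 0) := by
  unfold pref
  rw [List.take_add_one, List.getElem?_eq_getElem hk, List.map_append, List.sum_append]
  simp [List.getD, List.getElem?_eq_getElem hk]

theorem pref_succ_cases (hours : List Int) (k : Nat) :
    pref hours (k + 1) = pref hours k ∨ pref hours (k + 1) = pref hours k + 1 ∨
      pref hours (k + 1) = pref hours k - 1 := by
  by_cases hk : k < hours.length
  · rw [pref_succ_lt hours k hk]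
    unfold stepv
    split_ifs <;> omega
  · left
    unfold pref
    rw [List.take_of_length_le (by omega), List.take_of_length_le (by omega)]

theorem exists_hit (hours : List Int) {a : Nat} {v : Int} (hv : v ≤ 0)
    (ha : pref hours a ≤ v) : ∃ c ≤ a, pref hours c = v := by
  induction a with
  | zero =>
    refine ⟨0, le_refl _, ?_⟩
    have : pref hours 0 = 0 := rfl
    omega
  | succ a ih =>
    by_cases h : pref hours (a + 1) = v
    · exact ⟨a + 1, le_refl _, h⟩
    · have hlt : pref hours (a + 1) < v := lt_of_le_of_ne ha h
      have := pref_succ_cases hours a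
      have ha' : pref hours a ≤ v := by omega
      obtain ⟨c, hc, hcv⟩ := ih ha'
      exact ⟨c, by omega, hcv⟩
def firstHit (hours : List Int) (v : Int) : Nat → Option Nat
  | 0 => none
  | i + 1 =>
    match firstHit hours v i with
    | some k => some k
    | none => if pref hours (i + 1) = v ∧ pref hours (i + 1) ≤ 0 then some i else none

theorem firstHit_none (hours : List Int) {v : Int} {i : Nat}
    (h : firstHit hours v i = none) :
    ∀ k < i, ¬(pref hours (k + 1) = v ∧ pref hours (k + 1) ≤ 0) := by
  induction i with
  | zero => intro k hk; omega
  | succ i ih =>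
    unfold firstHit at h
    cases hfi : firstHit hours v i with
    | some k' => rw [hfi] at h; exact absurd h (by simp)
    | none =>
      rw [hfi] at h
      intro k hk
      by_cases hki : k < i
      · exact ih hfi k hki
      · have hik : k = i := by omega
        subst hik
        intro hcc
        rw [if_pos hcc] at h
        exact absurd h (by simp)

theorem firstHit_spec (hours : List Int) {v : Int} {i k : Nat}
    (h : firstHit hours v i = some k) :
    k < i ∧ pref hours (k + 1) = v ∧ v ≤ 0 ∧ ∀ j < k, pref hours (j + 1) ≠ v := by
  induction i with
  | zero => exact absurd h (by simp [firstHit])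
  | succ i ih =>
    unfold firstHit at h
    cases hfi : firstHit hours v i with
    | some k' =>
      rw [hfi] at h
      cases h
      obtain ⟨h1, h2, h3, h4⟩ := ih hfi
      exact ⟨by omega, h2, h3, h4⟩
    | none =>
      rw [hfi] at h
      split_ifs at h with hc
      · cases h
        refine ⟨by omega, hc.1, by omega, fun j hj hv => ?_⟩
        exact firstHit_none hours hfi j hj ⟨hv, by omega⟩
theorem foldMax_ge_init (l : List Nat) (p : Nat → Prop) [DecidablePred p] (g : Nat → Int)
    (init : Int) :
    init ≤ l.foldl (fun ans a => if p a then max ans (g a) else ans) init := by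
  induction l generalizing init with
  | nil => simp
  | cons x t ih =>
    simp only [List.foldl_cons]
    split_ifs
    · exact le_trans (le_max_left _ _) (ih _)
    · exact ih _

theorem foldMax_ge_cand (l : List Nat) (p : Nat → Prop) [DecidablePred p] (g : Nat → Int)
    (init : Int) {a : Nat} (hmem : a ∈ l) (hp : p a) :
    g a ≤ l.foldl (fun ans b => if p b then max ans (g b) else ans) init := by
  induction l generalizing init with
  | nil => simp at hmem
  | cons x t ih =>
    simp only [List.foldl_cons]
    rcases List.mem_cons.mp hmem with h | h
    · subst h
      rw [if_pos hp]
      exact le_trans (le_max_right _ _) (foldMax_ge_init t p g _)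
    · exact ih _ h

theorem foldMax_le (l : List Nat) (p : Nat → Prop) [DecidablePred p] (g : Nat → Int)
    (init M : Int) (h0 : init ≤ M) (h : ∀ a ∈ l, p a → g a ≤ M) :
    l.foldl (fun ans a => if p a then max ans (g a) else ans) init ≤ M := by
  induction l generalizing init with
  | nil => simpa
  | cons x t ih =>
    simp only [List.foldl_cons]
    split_ifs with hx
    · exact ih _ (max_le h0 (h x (List.mem_cons_self) hx)) (fun a ha => h a (List.mem_cons_of_mem _ ha))
    · exact ih _ h0 (fun a ha => h a (List.mem_cons_of_mem _ ha))

def innerF (hours : List Int) (b : Nat) (ans : Int) : Int :=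
  (List.range b).foldl (fun ans a =>
    if pref hours a < pref hours b then max ans ((b : Int) - (a : Int)) else ans) ans

def best (hours : List Int) : Nat → Int
  | 0 => 0
  | i + 1 => innerF hours (i + 1) (best hours i)

theorem best_le (hours : List Int) (i : Nat) : best hours i ≤ (i : Int) := by
  induction i with
  | zero => simp [best]
  | succ i ih =>
    show innerF hours (i + 1) (best hours i) ≤ _
    unfold innerF
    apply foldMax_le
    · push_cast; omega
    · intro a ha _
      have := List.mem_range.mp ha
      push_cast
      omega

theorem inner_pos (hours : List Int) (i : Nat) (h : 0 < pref hours (i + 1)) :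
    innerF hours (i + 1) (best hours i) = (i : Int) + 1 := by
  unfold innerF
  apply le_antisymm
  · apply foldMax_le
    · have := best_le hours i; omega
    · intro a ha _
      have := List.mem_range.mp ha
      push_cast
      omega
  · have hc := foldMax_ge_cand (List.range (i + 1)) (fun a => pref hours a < pref hours (i + 1))
      (fun a => ((i + 1 : Nat) : Int) - (a : Int)) (best hours i)
      (a := 0) (by simp) (by simpa [pref] using h)
    push_cast at hc ⊢
    omega

theorem inner_none (hours : List Int) (i : Nat) (x : Int) (hs : pref hours (i + 1) ≤ 0)
    (h : firstHit hours (pref hours (i + 1) - 1) i = none) :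
    innerF hours (i + 1) x = x := by
  unfold innerF
  have hnone : ∀ a ∈ List.range (i + 1), ¬ (pref hours a < pref hours (i + 1)) := by
    intro a ha hlt
    have hale : a ≤ i := by have := List.mem_range.mp ha; omega
    have hav : pref hours a ≤ pref hours (i + 1) - 1 := by omega
    obtain ⟨c, hca, hcv⟩ := exists_hit hours (v := pref hours (i + 1) - 1) (by omega) hav
    cases c with
    | zero =>
      have : pref hours 0 = 0 := rfl
      omega
    | succ c =>
      exact firstHit_none hours h c (by omega) ⟨hcv, by omega⟩
  calc (List.range (i + 1)).foldl (fun ans a =>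
        if pref hours a < pref hours (i + 1) then max ans (((i + 1 : Nat) : Int) - (a : Int)) else ans) x
      = (List.range (i + 1)).foldl (fun ans _ => ans) x := by
        apply PySem.List.foldl_congr_mem
        intro acc a ha
        rw [if_neg (hnone a ha)]
    _ = x := PySem.List.foldl_ignore _ _

theorem inner_some (hours : List Int) (i k : Nat) (hs : pref hours (i + 1) ≤ 0)
    (h : firstHit hours (pref hours (i + 1) - 1) i = some k) :
    innerF hours (i + 1) (best hours i) = max (best hours i) ((i : Int) - (k : Int)) := by
  obtain ⟨hki, hkv, _, hmin⟩ := firstHit_spec hours h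
  unfold innerF
  apply le_antisymm
  · apply foldMax_le
    · exact le_max_left _ _
    · intro a ha hlt
      have hale : a ≤ i := by have := List.mem_range.mp ha; omega
      have hav : pref hours a ≤ pref hours (i + 1) - 1 := by omega
      obtain ⟨c, hca, hcv⟩ := exists_hit hours (v := pref hours (i + 1) - 1) (by omega) hav
      cases c with
      | zero =>
        have : pref hours 0 = 0 := rfl
        omega
      | succ c =>
        have hkc : k ≤ c := by
          by_contra hcl
          exact hmin c (by omega) hcv
        push_cast
        omega
  · apply max_le
    · exact foldMax_ge_init _ _ _ _
    · have hc := foldMax_ge_cand (List.range (i + 1)) (fun a => pref hours a < pref hours (i + 1))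
        (fun a => ((i + 1 : Nat) : Int) - (a : Int)) (best hours i)
        (a := k + 1) (List.mem_range.mpr (by omega)) (by omega)
      push_cast at hc ⊢
      omega
theorem firstHit_succ_ne (hours : List Int) (v : Int) (i : Nat)
    (h : pref hours (i + 1) ≠ v) : firstHit hours v (i + 1) = firstHit hours v i := by
  have e : firstHit hours v (i + 1) = (match firstHit hours v i with
    | some k => some k
    | none => if pref hours (i + 1) = v ∧ pref hours (i + 1) ≤ 0 then some i else none) := rfl
  rw [e]
  cases hfi : firstHit hours v i with
  | some k => rfl
  | none => simp [h]

theorem firstHit_succ_pos (hours : List Int) (v : Int) (i : Nat)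
    (h : 0 < pref hours (i + 1)) : firstHit hours v (i + 1) = firstHit hours v i := by
  have e : firstHit hours v (i + 1) = (match firstHit hours v i with
    | some k => some k
    | none => if pref hours (i + 1) = v ∧ pref hours (i + 1) ≤ 0 then some i else none) := rfl
  rw [e]
  cases hfi : firstHit hours v i with
  | some k => rfl
  | none =>
    rw [if_neg]
    intro ⟨_, h2⟩
    omega

theorem loopA (hours : List Int) (i : Nat) (hi : i ≤ hours.length) :
    ∃ d : PySem.Dict Int Int,
      (List.range i).foldl (fun st (k : Nat) => stepA hours st (k : Int)) (PySem.Dict.empty, 0, 0) =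
        (d, pref hours i, best hours i) ∧
      ∀ v : Int, d.get? v = (firstHit hours v i).map (fun k => (k : Int)) := by
  induction i with
  | zero =>
    refine ⟨PySem.Dict.empty, rfl, fun v => ?_⟩
    rw [PySem.Dict.get?_empty]
    rfl
  | succ i ih =>
    obtain ⟨d, heq, hget⟩ := ih (by omega)
    rw [List.range_succ, List.foldl_append, heq]
    simp only [List.foldl_cons, List.foldl_nil]
    have hsv : pref hours i + (if PySem.List.pyGetD hours (i : Int) 0 > 8 then (1:Int) else -1)
        = pref hours (i + 1) := by
      rw [PySem.List.pyGetD_natCast, pref_succ_lt hours i (by omega)]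
      rfl
    unfold stepA
    simp only [hsv]
    by_cases hpos : pref hours (i + 1) > 0
    · rw [if_pos hpos]
      refine ⟨d, ?_, fun v => ?_⟩
      · have : best hours (i + 1) = (i : Int) + 1 := inner_pos hours i hpos
        rw [this]
      · rw [hget, firstHit_succ_pos hours v i hpos]
    · rw [if_neg hpos]
      have hs0 : pref hours (i + 1) ≤ 0 := by omega
      have hfh1 : firstHit hours (pref hours (i + 1) - 1) (i + 1)
          = firstHit hours (pref hours (i + 1) - 1) i :=
        firstHit_succ_ne hours _ i (by omega)
      set d' := if d.contains (pref hours (i + 1)) then d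
        else d.insert (pref hours (i + 1)) (i : Int) with hd'
      have hget' : ∀ v : Int, d'.get? v = (firstHit hours v (i + 1)).map (fun k => (k : Int)) := by
        intro v
        by_cases hv : v = pref hours (i + 1)
        · subst hv
          rw [hd']
          cases hfs : firstHit hours (pref hours (i + 1)) i with
          | some k =>
            have hc : d.contains (pref hours (i + 1)) = true := by
              rw [PySem.Dict.contains_eq_isSome_get?, hget, hfs]; rfl
            rw [if_pos hc, hget, hfs]
            have e : firstHit hours (pref hours (i + 1)) (i + 1)
                = (match firstHit hours (pref hours (i + 1)) i with
              | some k => some k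
              | none => if pref hours (i + 1) = pref hours (i + 1) ∧ pref hours (i + 1) ≤ 0
                  then some i else none) := rfl
            rw [e, hfs]
          | none =>
            have hc : d.contains (pref hours (i + 1)) = false := by
              rw [PySem.Dict.contains_eq_isSome_get?, hget, hfs]; rfl
            rw [if_neg (by simp [hc]), PySem.Dict.get?_insert_self]
            have e : firstHit hours (pref hours (i + 1)) (i + 1)
                = (match firstHit hours (pref hours (i + 1)) i with
              | some k => some k
              | none => if pref hours (i + 1) = pref hours (i + 1) ∧ pref hours (i + 1) ≤ 0
                  then some i else none) := rfl
            rw [e, hfs, if_pos ⟨rfl, hs0⟩]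
            rfl
        · have : d'.get? v = d.get? v := by
            rw [hd']
            split_ifs
            · rfl
            · exact PySem.Dict.get?_insert_of_ne d _ hv
          rw [this, hget, firstHit_succ_ne hours v i (fun h => hv h.symm)]
      refine ⟨d', ?_, hget'⟩
      cases hfs : firstHit hours (pref hours (i + 1) - 1) i with
      | some k =>
        have hq : d'.get? (pref hours (i + 1) - 1) = some (k : Int) := by
          rw [hget' _, hfh1, hfs]; rfl
        have hc : d'.contains (pref hours (i + 1) - 1) = true := by
          rw [PySem.Dict.contains_eq_isSome_get?, hq]; rfl
        rw [if_pos hc, PySem.Dict.getD_eq_get?_getD, hq]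
        have : best hours (i + 1) = max (best hours i) ((i : Int) - (k : Int)) :=
          inner_some hours i k hs0 hfs
        rw [this]
        rfl
      | none =>
        have hq : d'.get? (pref hours (i + 1) - 1) = none := by
          rw [hget' _, hfh1, hfs]; rfl
        have hc : d'.contains (pref hours (i + 1) - 1) = false := by
          rw [PySem.Dict.contains_eq_isSome_get?, hq]; rfl
        rw [if_neg (by simp [hc])]
        have : best hours (i + 1) = best hours i := inner_none hours i (best hours i) hs0 hfs
        rw [this]
theorem A_eq_best (hours : List Int) : longestWPI hours = best hours hours.length := by
  unfold longestWPI
  rw [PySem.List.pyRange_zero_natCast, List.foldl_map]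
  obtain ⟨d, heq, -⟩ := loopA hours hours.length (le_refl _)
  rw [heq]

theorem pref_cons_succ (h : Int) (t : List Int) (a : Nat) :
    pref (h :: t) (a + 1) = stepv h + pref t a := by
  unfold pref
  rw [List.take_succ_cons, List.map_cons, List.sum_cons]

theorem buildPre_getD (hours : List Int) (c : Int) (a : Nat) (ha : a ≤ hours.length) :
    (buildPre c hours).getD a 0 = c + pref hours a := by
  induction hours generalizing c a with
  | nil =>
    have : a = 0 := by simpa using ha
    subst this
    simp [buildPre, pref]
  | cons h t ih =>
    cases a with
    | zero => simp [buildPre, pref]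
    | succ a =>
      have ha' : a ≤ t.length := by simpa using ha
      show (buildPre (c + (if h > 8 then 1 else -1)) t).getD a 0 = _
      rw [ih _ a ha', pref_cons_succ]
      unfold stepv
      ring

theorem Fspec (hours : List Int) (b : Nat) (hb : b ≤ hours.length) (x : Int) :
    (PySem.List.pyRange 0 (b : Int) 1).foldl (fun ans a =>
      if PySem.List.pyGetD (buildPre 0 hours) a 0 < PySem.List.pyGetD (buildPre 0 hours) (b : Int) 0
      then max ans ((b : Int) - a) else ans) x = innerF hours b x := by
  rw [PySem.List.pyRange_zero_natCast, List.foldl_map]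
  unfold innerF
  apply PySem.List.foldl_congr_mem
  intro acc a ha
  have ha' : a < b := List.mem_range.mp ha
  rw [PySem.List.pyGetD_natCast, PySem.List.pyGetD_natCast,
      buildPre_getD hours 0 a (by omega), buildPre_getD hours 0 b hb, zero_add, zero_add]

theorem B_eq_best (hours : List Int) : longestWPI_alt hours = best hours hours.length := by
  show (PySem.List.pyRange 1 ((hours.length : Int) + 1) 1).foldl (fun ans b =>
    (PySem.List.pyRange 0 b 1).foldl (fun ans a =>
      if PySem.List.pyGetD (buildPre 0 hours) a 0 < PySem.List.pyGetD (buildPre 0 hours) b 0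
      then max ans (b - a) else ans) ans) 0 = best hours hours.length
  have houter : PySem.List.pyRange 0 ((hours.length : Int) + 1) 1
      = 0 :: PySem.List.pyRange 1 ((hours.length : Int) + 1) 1 := by
    have h01 : (0 : Int) < (hours.length : Int) + 1 := by positivity
    rw [PySem.List.pyRange_one_cons h01, zero_add]
  have hstep : (PySem.List.pyRange 0 ((hours.length : Int) + 1) 1).foldl (fun ans b =>
      (PySem.List.pyRange 0 b 1).foldl (fun ans a =>
        if PySem.List.pyGetD (buildPre 0 hours) a 0 < PySem.List.pyGetD (buildPre 0 hours) b 0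
        then max ans (b - a) else ans) ans) 0
      = (PySem.List.pyRange 1 ((hours.length : Int) + 1) 1).foldl (fun ans b =>
      (PySem.List.pyRange 0 b 1).foldl (fun ans a =>
        if PySem.List.pyGetD (buildPre 0 hours) a 0 < PySem.List.pyGetD (buildPre 0 hours) b 0
        then max ans (b - a) else ans) ans) 0 := by
    rw [houter, List.foldl_cons]
    rfl
  rw [← hstep]
  have hcast : ((hours.length : Int) + 1) = ((hours.length + 1 : Nat) : Int) := by push_cast; ring
  rw [hcast, PySem.List.pyRange_zero_natCast, List.foldl_map]
  have main : ∀ i : Nat, i ≤ hours.length →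
      (List.range (i + 1)).foldl (fun ans (b : Nat) =>
        (PySem.List.pyRange 0 (b : Int) 1).foldl (fun ans a =>
          if PySem.List.pyGetD (buildPre 0 hours) a 0 < PySem.List.pyGetD (buildPre 0 hours) (b : Int) 0
          then max ans ((b : Int) - a) else ans) ans) 0 = best hours i := by
    intro i
    induction i with
    | zero =>
      intro _
      simp only [List.range_succ, List.range_zero, List.nil_append, List.foldl_cons, List.foldl_nil]
      rw [Fspec hours 0 (by omega) 0]
      rfl
    | succ i ih =>
      intro hi
      rw [List.range_succ, List.foldl_append, List.foldl_cons, List.foldl_nil,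
          ih (by omega), Fspec hours (i + 1) hi]
      rfl
  exact main hours.length (le_refl _)

-- ===== VERDICT (by name: the statement is the Claim_ definition above) =====
theorem longestWPI_spec : Claim_equal_longestWPI := by
  intro hours _
  unfold Spec_longestWPI
  rw [A_eq_best, B_eq_best]
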